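-- pv_equiv track=rewrite | github.com/soknetpisey-crypto/IoT_lab | lab4/Task 4/lab4_task4.py | make_epoch
-- ===== SOURCE A (Python) =====
-- def make_epoch(t):
--     year, month, day, hour, minute, second = t
--
--     # Days from 1970 to given year
--     days = (year - 1970) * 365
--     # Add leap years between 1970 and year
--     days += (year - 1969) // 4
--     # Days for each month
--     month_days = [31, 28, 31, 30, 31, 30, 31, 31, 30, 31, 30, 31]
--     if year % 4 == 0:
--         month_days[1] = 29
--     for m in range(month - 1):
--         days += month_days[m]
--     days += day - 1
--
--     epoch = days * 86400 + hour * 3600 + minute * 60 + second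
--
--     return epoch * 1000
-- ===== SOURCE B (Python) =====
-- # Cumulative days before each month (index m-1 for month m); 13th entry = year total.
-- _DAYS_BEFORE      = [0, 31, 59, 90, 120, 151, 181, 212, 243, 273, 304, 334, 365]
-- _DAYS_BEFORE_LEAP = [0, 31, 60, 91, 121, 152, 182, 213, 244, 274, 305, 335, 366]
--
-- def make_epoch(t):
--     year, month, day, hour, minute, second = t
--     days = (year - 1970) * 365 + (year - 1969) // 4
--     cum = _DAYS_BEFORE_LEAP if year % 4 == 0 else _DAYS_BEFORE
--     days += cum[month - 1] + day - 1
--     return (days * 86400 + hour * 3600 + minute * 60 + second) * 1000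
-- ===== Notes on version B (the rewrite author's own statement) =====
-- stated objective: idiomatic
-- what changed: Replaces the month-accumulation loop (and the mutated month-length list) with a single lookup into a precomputed cumulative days-before-month prefix table (common and leap variants); Pre_ keeps months 1..13 only: for month >= 14 A raises IndexError, and for non-positive months (no such calendar month) A's zero month offset is an accident of the empty loop while B's direct index wraps negatively or raises IndexError.
-- outside the precondition, e.g. on make_epoch((1970, 0, 1, 0, 0, 0)): A returns 0, B returns 31536000000; on make_epoch((1970, -20, 1, 0, 0, 0)): A returns 0, B raises IndexError
import Mathlib
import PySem

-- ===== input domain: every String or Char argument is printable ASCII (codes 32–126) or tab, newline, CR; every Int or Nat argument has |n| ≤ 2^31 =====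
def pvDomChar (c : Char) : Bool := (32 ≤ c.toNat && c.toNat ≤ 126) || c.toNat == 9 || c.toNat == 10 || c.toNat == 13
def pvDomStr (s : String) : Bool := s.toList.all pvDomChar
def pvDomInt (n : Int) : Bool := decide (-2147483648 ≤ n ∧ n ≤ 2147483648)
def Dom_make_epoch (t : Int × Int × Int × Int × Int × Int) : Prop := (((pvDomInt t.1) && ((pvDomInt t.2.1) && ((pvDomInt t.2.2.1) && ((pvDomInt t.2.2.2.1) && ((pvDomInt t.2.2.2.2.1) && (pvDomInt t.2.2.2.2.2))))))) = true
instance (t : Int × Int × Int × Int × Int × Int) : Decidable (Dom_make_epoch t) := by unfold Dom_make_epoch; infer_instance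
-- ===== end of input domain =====

-- B replaces the month-accumulation loop (and the mutated month-length list) with one
-- lookup into a precomputed cumulative days-before-month prefix table: more idiomatic.

-- ===== PORT A =====
def make_epoch (t : Int × Int × Int × Int × Int × Int) : Int :=
  let year := t.1; let month := t.2.1; let day := t.2.2.1
  let hour := t.2.2.2.1; let minute := t.2.2.2.2.1; let second := t.2.2.2.2.2
  let days := (year - 1970) * 365
  let days := days + PySem.Int.floordiv (year - 1969) 4
  let month_days : List Int := [31, 28, 31, 30, 31, 30, 31, 31, 30, 31, 30, 31]
  let month_days := if PySem.Int.mod year 4 == 0 then month_days.set 1 29 else month_days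
  -- for m in range(month - 1): days += month_days[m]  (IndexError = none; Pre_ keeps the index in range)
  let days := (PySem.List.pyRange 0 (month - 1) 1).foldl
      (fun d m => d + (PySem.List.pyGet? month_days m).getD 0) days
  let days := days + day - 1
  let epoch := days * 86400 + hour * 3600 + minute * 60 + second
  epoch * 1000

-- ===== PORT B =====
def pvDaysBefore : List Int := [0, 31, 59, 90, 120, 151, 181, 212, 243, 273, 304, 334, 365]
def pvDaysBeforeLeap : List Int := [0, 31, 60, 91, 121, 152, 182, 213, 244, 274, 305, 335, 366]

def make_epoch_alt (t : Int × Int × Int × Int × Int × Int) : Int :=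
  let year := t.1; let month := t.2.1; let day := t.2.2.1
  let hour := t.2.2.2.1; let minute := t.2.2.2.2.1; let second := t.2.2.2.2.2
  let days := (year - 1970) * 365 + PySem.Int.floordiv (year - 1969) 4
  let cum := if PySem.Int.mod year 4 == 0 then pvDaysBeforeLeap else pvDaysBefore
  let days := days + (PySem.List.pyGet? cum (month - 1)).getD 0 + day - 1
  (days * 86400 + hour * 3600 + minute * 60 + second) * 1000

-- ===== PRECONDITION & SPEC =====
-- Pre_ keeps only actual month indices 1..13: for month ≥ 14 A raises IndexError; for
-- non-positive months (no such calendar month exists) A's zero month offset is an accident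
-- of the empty loop, while B's direct table index wraps negatively or raises IndexError.
def Pre_make_epoch (t : Int × Int × Int × Int × Int × Int) : Prop := 1 ≤ t.2.1 ∧ t.2.1 ≤ 13
instance (t : Int × Int × Int × Int × Int × Int) : Decidable (Pre_make_epoch t) := by unfold Pre_make_epoch; infer_instance
def pvWitness_make_epoch : (Int × Int × Int × Int × Int × Int) := (2024, 6, 15, 12, 30, 45)

def Spec_make_epoch (t : Int × Int × Int × Int × Int × Int) (out : Int) : Prop := out = make_epoch_alt t
instance (t : Int × Int × Int × Int × Int × Int) (out : Int) : Decidable (Spec_make_epoch t out) := by unfold Spec_make_epoch; infer_instance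

-- ===== CLAIM (what is proved, stated in full; the proofs are below) =====
def Claim_equal_make_epoch : Prop := ∀ (t : Int × Int × Int × Int × Int × Int), Dom_make_epoch t → Pre_make_epoch t → Spec_make_epoch t (make_epoch t)

-- ===== LEMMAS AND PROOFS =====

-- sum of A's per-month lengths (common year) = B's prefix-table entry
theorem pv_sum_common (month : Int) (h1 : 1 ≤ month) (h13 : month ≤ 13) :
    ((PySem.List.pyRange 0 (month - 1) 1).map
        (fun m => (PySem.List.pyGet? ([31, 28, 31, 30, 31, 30, 31, 31, 30, 31, 30, 31] : List Int) m).getD 0)).sum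
    = (PySem.List.pyGet? pvDaysBefore (month - 1)).getD 0 := by
  interval_cases month <;> decide

-- sum of A's per-month lengths (leap year) = B's leap prefix-table entry
theorem pv_sum_leap (month : Int) (h1 : 1 ≤ month) (h13 : month ≤ 13) :
    ((PySem.List.pyRange 0 (month - 1) 1).map
        (fun m => (PySem.List.pyGet? (([31, 28, 31, 30, 31, 30, 31, 31, 30, 31, 30, 31] : List Int).set 1 29) m).getD 0)).sum
    = (PySem.List.pyGet? pvDaysBeforeLeap (month - 1)).getD 0 := by
  interval_cases month <;> decide

-- ===== VERDICT (by name: the statement is the Claim_ definition above) =====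
theorem make_epoch_spec : Claim_equal_make_epoch := by
  rintro ⟨year, month, day, hour, minute, second⟩ _ ⟨h1, h13⟩
  unfold Spec_make_epoch
  dsimp only [make_epoch, make_epoch_alt]
  rw [PySem.List.foldl_add]
  by_cases hy : (PySem.Int.mod year 4 == 0) = true <;>
    simp only [if_pos, hy, Bool.false_eq_true, ite_false] <;>
  · first
      | rw [pv_sum_leap month h1 h13]
      | rw [pv_sum_common month h1 h13]
    try ring
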